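-- pv_equiv track=rewrite | github.com/release-art/fca-mcp | src/fca_mcp/cli.py | _categorize_permissions
-- ===== SOURCE A (Python) =====
-- def _categorize_permissions(permissions: list) -> dict:
--     """Categorize permissions by type."""
--     categories = {"investment": 0, "lending": 0, "insurance": 0, "payment": 0, "advisory": 0, "other": 0}
--
--     for perm in permissions:
--         name = perm.get("permission_name", "").lower()
--
--         if any(word in name for word in ["investment", "portfolio", "fund", "securities"]):
--             categories["investment"] += 1
--         elif any(word in name for word in ["lending", "credit", "loan", "mortgage"]):
--             categories["lending"] += 1
--         elif any(word in name for word in ["insurance", "underwriting"]):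
--             categories["insurance"] += 1
--         elif any(word in name for word in ["payment", "money", "transfer"]):
--             categories["payment"] += 1
--         elif any(word in name for word in ["advising", "advisory", "consultation"]):
--             categories["advisory"] += 1
--         else:
--             categories["other"] += 1
--
--     return categories
-- ===== SOURCE B (Python) =====
-- RULES = [
--     ("investment", ["investment", "portfolio", "fund", "securities"]),
--     ("lending", ["lending", "credit", "loan", "mortgage"]),
--     ("insurance", ["insurance", "underwriting"]),
--     ("payment", ["payment", "money", "transfer"]),
--     ("advisory", ["advising", "advisory", "consultation"]),
-- ]
--
--
-- def _categorize_permissions(permissions: list) -> dict: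
--     # Category-major staged filtering: for each category in precedence order,
--     # count the still-unclaimed names it matches, then remove them from the pool;
--     # whatever survives every stage is "other".
--     names = [perm.get("permission_name", "").lower() for perm in permissions]
--     categories = {}
--     for cat, words in RULES:
--         categories[cat] = sum(1 for n in names if any(w in n for w in words))
--         names = [n for n in names if not any(w in n for w in words)]
--     categories["other"] = len(names)
--     return categories
-- ===== Notes on version B (the rewrite author's own statement) =====
-- stated objective: alternative
-- what changed: Replaces A's item-major elif chain (classify each permission, bump a dict bucket) with a category-major staged filter: for each category in precedence order count the still-unclaimed lowered names it matches and remove them from the pool, the survivors of all stages being 'other'; precedence is enforced by removal instead of branch order.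
import Mathlib
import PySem

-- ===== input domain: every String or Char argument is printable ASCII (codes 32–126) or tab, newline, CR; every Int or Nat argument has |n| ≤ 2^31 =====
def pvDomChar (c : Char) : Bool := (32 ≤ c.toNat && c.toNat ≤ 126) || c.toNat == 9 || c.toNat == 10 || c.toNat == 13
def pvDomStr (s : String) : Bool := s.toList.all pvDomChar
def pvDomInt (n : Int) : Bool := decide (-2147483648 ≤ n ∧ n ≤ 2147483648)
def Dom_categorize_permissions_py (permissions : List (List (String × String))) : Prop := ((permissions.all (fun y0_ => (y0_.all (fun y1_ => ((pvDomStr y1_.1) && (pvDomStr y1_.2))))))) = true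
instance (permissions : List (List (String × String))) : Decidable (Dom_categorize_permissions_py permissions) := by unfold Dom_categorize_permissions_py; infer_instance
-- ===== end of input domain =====

-- B replaces A's item-major elif chain with a category-major staged filter: for each
-- category in precedence order it counts the still-unclaimed names it matches and
-- removes them from the pool; the survivors are "other" (alternative decomposition).

-- ===== PORT A =====
def pvStepA (d : PySem.Dict String Int) (perm : List (String × String)) : PySem.Dict String Int :=
  let name := PySem.Str.lower ((PySem.Dict.mk perm).getD "permission_name" "")
  if ["investment", "portfolio", "fund", "securities"].any (fun w => PySem.Str.isIn w name) then
    d.modify "investment" 0 (· + 1)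
  else if ["lending", "credit", "loan", "mortgage"].any (fun w => PySem.Str.isIn w name) then
    d.modify "lending" 0 (· + 1)
  else if ["insurance", "underwriting"].any (fun w => PySem.Str.isIn w name) then
    d.modify "insurance" 0 (· + 1)
  else if ["payment", "money", "transfer"].any (fun w => PySem.Str.isIn w name) then
    d.modify "payment" 0 (· + 1)
  else if ["advising", "advisory", "consultation"].any (fun w => PySem.Str.isIn w name) then
    d.modify "advisory" 0 (· + 1)
  else
    d.modify "other" 0 (· + 1)

def categorize_permissions_py (permissions : List (List (String × String))) : List (String × Int) :=
  let categories : PySem.Dict String Int :=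
    PySem.Dict.mk [("investment", 0), ("lending", 0), ("insurance", 0), ("payment", 0), ("advisory", 0), ("other", 0)]
  (permissions.foldl pvStepA categories).items

-- ===== PORT B =====
def pvMatch (ws : List String) (n : String) : Bool := ws.any (fun w => PySem.Str.isIn w n)

def pvRules : List (String × List String) :=
  [("investment", ["investment", "portfolio", "fund", "securities"]),
   ("lending", ["lending", "credit", "loan", "mortgage"]),
   ("insurance", ["insurance", "underwriting"]),
   ("payment", ["payment", "money", "transfer"]),
   ("advisory", ["advising", "advisory", "consultation"])]

def pvNameOf (perm : List (String × String)) : String :=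
  PySem.Str.lower ((PySem.Dict.mk perm).getD "permission_name" "")

-- Source B's loop over RULES: each stage inserts (cat, count of matches among the remaining
-- names) into the fresh-keyed dict (= appends in insertion order) and filters the pool;
-- after the loop, "other" gets the survivors' count.
def pvStages : List (String × List String) → List String → List (String × Int)
  | [], names => [("other", (names.length : Int))]
  | r :: rs, names =>
      (r.1, (names.countP (pvMatch r.2) : Int)) ::
        pvStages rs (names.filter (fun n => !pvMatch r.2 n))

def categorize_permissions_py_alt (permissions : List (List (String × String))) : List (String × Int) :=
  pvStages pvRules (permissions.map pvNameOf)

-- ===== PRECONDITION & SPEC =====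
def Spec_categorize_permissions_py (permissions : List (List (String × String))) (out : List (String × Int)) : Prop := out = categorize_permissions_py_alt permissions
instance (permissions : List (List (String × String))) (out : List (String × Int)) : Decidable (Spec_categorize_permissions_py permissions out) := by unfold Spec_categorize_permissions_py; infer_instance

-- ===== CLAIM (what is proved, stated in full; the proofs are below) =====
def Claim_equal_categorize_permissions_py : Prop := ∀ (permissions : List (List (String × String))), Dom_categorize_permissions_py permissions → Spec_categorize_permissions_py permissions (categorize_permissions_py permissions)

-- ===== LEMMAS AND PROOFS =====

def pvCats : List String := ["investment", "lending", "insurance", "payment", "advisory", "other"]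

-- the first-match category of a name under a rule list ("other" if none matches)
def pvClassifyL (rs : List (String × List String)) (n : String) : String :=
  match rs.find? (fun r => pvMatch r.2 n) with
  | some r => r.1
  | none => "other"

theorem pvClassifyL_cons (r : String × List String) (rs : List (String × List String)) (n : String) :
    pvClassifyL (r :: rs) n = (if pvMatch r.2 n then r.1 else pvClassifyL rs n) := by
  unfold pvClassifyL
  simp only [List.find?]
  cases pvMatch r.2 n <;> simp

theorem pvClassifyL_mem (rs : List (String × List String)) (n : String) :
    pvClassifyL rs n = "other" ∨ pvClassifyL rs n ∈ rs.map Prod.fst := by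
  unfold pvClassifyL
  cases h : rs.find? (fun r => pvMatch r.2 n) with
  | none => left; rfl
  | some r => right; exact List.mem_map_of_mem (List.mem_of_find?_eq_some h)

-- A's loop body increments exactly the bucket the first-match classifier picks.
theorem pvStepA_eq_modify_classify (d : PySem.Dict String Int) (perm : List (String × String)) :
    pvStepA d perm = d.modify (pvClassifyL pvRules (pvNameOf perm)) 0 (· + 1) := by
  unfold pvStepA pvClassifyL pvNameOf pvMatch
  dsimp only
  simp only [pvRules, List.find?]
  cases h1 : (["investment", "portfolio", "fund", "securities"].any fun w => PySem.Str.isIn w (PySem.Str.lower ((PySem.Dict.mk perm).getD "permission_name" ""))) <;>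
  cases h2 : (["lending", "credit", "loan", "mortgage"].any fun w => PySem.Str.isIn w (PySem.Str.lower ((PySem.Dict.mk perm).getD "permission_name" ""))) <;>
  cases h3 : (["insurance", "underwriting"].any fun w => PySem.Str.isIn w (PySem.Str.lower ((PySem.Dict.mk perm).getD "permission_name" ""))) <;>
  cases h4 : (["payment", "money", "transfer"].any fun w => PySem.Str.isIn w (PySem.Str.lower ((PySem.Dict.mk perm).getD "permission_name" ""))) <;>
  cases h5 : (["advising", "advisory", "consultation"].any fun w => PySem.Str.isIn w (PySem.Str.lower ((PySem.Dict.mk perm).getD "permission_name" ""))) <;> rfl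

theorem pvClassify_mem_cats (perm : List (String × String)) :
    pvClassifyL pvRules (pvNameOf perm) ∈ pvCats := by
  rcases pvClassifyL_mem pvRules (pvNameOf perm) with h | h
  · rw [h]; decide
  · have hmap : pvRules.map Prod.fst = ["investment", "lending", "insurance", "payment", "advisory"] := by
      simp [pvRules]
    rw [hmap] at h
    simp only [List.mem_cons, List.not_mem_nil, or_false] at h
    rcases h with h | h | h | h | h <;> (rw [h]; decide)

theorem pvFoldA_eq (xs : List (List (String × String))) (d : PySem.Dict String Int) :
    xs.foldl pvStepA d = (xs.map (fun p => pvClassifyL pvRules (pvNameOf p))).foldl (fun d x => d.modify x 0 (· + 1)) d := by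
  induction xs generalizing d with
  | nil => rfl
  | cons p xs ih => simp only [List.foldl_cons, List.map_cons, pvStepA_eq_modify_classify, ih]

-- A's result, characterised: per category, the number of permissions it classifies there.
theorem pvA_eq (permissions : List (List (String × String))) :
    categorize_permissions_py permissions
      = pvCats.map (fun c => (c, ((permissions.map (fun p => pvClassifyL pvRules (pvNameOf p))).count c : Int))) := by
  unfold categorize_permissions_py
  dsimp only
  rw [pvFoldA_eq]
  set d0 : PySem.Dict String Int :=
    PySem.Dict.mk [("investment", 0), ("lending", 0), ("insurance", 0), ("payment", 0), ("advisory", 0), ("other", 0)] with hd0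
  set labels := permissions.map (fun p => pvClassifyL pvRules (pvNameOf p)) with hl
  have hmem : ∀ x ∈ labels, x ∈ pvCats := by
    intro x hx
    rw [hl] at hx
    obtain ⟨p, _, rfl⟩ := List.mem_map.mp hx
    exact pvClassify_mem_cats p
  have hkeys0 : d0.keys = pvCats := by rw [hd0]; simp [pvCats]
  have hkeys : (labels.foldl (fun d x => d.modify x 0 (· + 1)) d0).keys = pvCats := by
    rw [PySem.Dict.keys_foldl_modify, PySem.Set.update_eq_append_filter, hkeys0]
    have hfil : (PySem.Set.ofList labels).filter (fun y => !(PySem.Set.contains pvCats y)) = [] := by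
      apply List.filter_eq_nil_iff.mpr
      intro y hy
      have hy' : y ∈ labels := (PySem.Set.mem_ofList labels y).mp hy
      simp [PySem.Set.contains_eq_listContains, hmem y hy']
    rw [hfil, List.append_nil]
  have hnd : (labels.foldl (fun d x => d.modify x 0 (· + 1)) d0).keys.Nodup := by
    rw [hkeys]; decide
  rw [PySem.Dict.items_eq_map_keys _ hnd (0 : Int), hkeys]
  apply List.map_congr_left
  intro c hc
  rw [PySem.Dict.getD_foldl_modify_add_one]
  have hz : d0.getD c 0 = 0 := by
    fin_cases hc <;> (rw [hd0]; decide)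
  rw [hz, zero_add]

-- B's staged filter, characterised the same way, for any rule list with distinct
-- category names none of which is "other".
theorem pvStages_eq (rs : List (String × List String)) (ns : List String)
    (hnd : (rs.map Prod.fst).Nodup) (ho : "other" ∉ rs.map Prod.fst) :
    pvStages rs ns
      = rs.map (fun r => (r.1, (ns.countP (fun n => pvClassifyL rs n == r.1) : Int)))
        ++ [("other", (ns.countP (fun n => pvClassifyL rs n == "other") : Int))] := by
  induction rs generalizing ns with
  | nil =>
      simp [pvStages, pvClassifyL, List.find?]
  | cons r rs ih =>
      simp only [List.map_cons, List.nodup_cons, List.mem_cons] at hnd ho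
      obtain ⟨hr, hnd'⟩ := hnd
      have hro : r.1 ≠ "other" := fun h => ho (Or.inl h.symm)
      have ho' : "other" ∉ rs.map Prod.fst := fun h => ho (Or.inr h)
      have hhead : ns.countP (fun n => pvClassifyL (r :: rs) n == r.1) = ns.countP (pvMatch r.2) := by
        apply List.countP_congr
        intro n _
        simp only [pvClassifyL_cons]
        cases hm : pvMatch r.2 n with
        | true => simp
        | false =>
            simp only [if_false, beq_iff_eq, Bool.false_eq_true, iff_false]
            intro hq
            rcases pvClassifyL_mem rs n with h | h
            · exact hro (hq ▸ h)
            · exact hr (hq ▸ h)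
      have htail : ∀ (c : String), c ≠ r.1 →
          ns.countP (fun n => pvClassifyL (r :: rs) n == c)
            = (ns.filter (fun n => !pvMatch r.2 n)).countP (fun n => pvClassifyL rs n == c) := by
        intro c hc
        rw [List.countP_filter]
        apply List.countP_congr
        intro n _
        simp only [pvClassifyL_cons]
        cases hm : pvMatch r.2 n with
        | true => simp [Ne.symm hc]
        | false => simp
      show (r.1, (ns.countP (pvMatch r.2) : Int)) :: pvStages rs (ns.filter (fun n => !pvMatch r.2 n)) = _
      rw [ih (ns.filter (fun n => !pvMatch r.2 n)) hnd' ho']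
      rw [List.map_cons, List.cons_append]
      congr 1
      · rw [hhead]
      · congr 1
        · apply List.map_congr_left
          intro r' hr'
          have hne : r'.1 ≠ r.1 := fun h => hr (h ▸ List.mem_map_of_mem hr')
          rw [htail r'.1 hne]
        · rw [htail "other" (Ne.symm hro)]

theorem categorize_permissions_py_spec : Claim_equal_categorize_permissions_py := by
  intro permissions _
  show categorize_permissions_py permissions = categorize_permissions_py_alt permissions
  rw [pvA_eq]
  unfold categorize_permissions_py_alt
  rw [pvStages_eq pvRules (permissions.map pvNameOf) (by decide) (by decide)]
  have hcnt : ∀ (c : String),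
      ((permissions.map (fun p => pvClassifyL pvRules (pvNameOf p))).count c : Int)
        = (((permissions.map pvNameOf).countP (fun n => pvClassifyL pvRules n == c) : Nat) : Int) := by
    intro c
    rw [List.count_eq_countP, List.countP_map, List.countP_map]
    rfl
  have hmapeq : pvCats.map (fun c => (c, ((permissions.map (fun p => pvClassifyL pvRules (pvNameOf p))).count c : Int)))
      = pvCats.map (fun c => (c, (((permissions.map pvNameOf).countP (fun n => pvClassifyL pvRules n == c) : Nat) : Int))) := by
    apply List.map_congr_left
    intro c _
    rw [hcnt]
  rw [hmapeq]
  rfl
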